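-- pv_equiv track=rewrite | github.com/vaibhav-jain-dev/learning-algo | problems/200-must-solve/dynamic-programming/15-square-of-zeroes/python_code.py | find_largest_square_of_zeroes
-- ===== SOURCE A (Python) =====
-- from typing import List, Tuple, Optional
--
-- def has_square_of_zeroes(below: List[List[int]], right: List[List[int]],
--                          r: int, c: int, size: int) -> bool:
--     """
--     Check if square starting at (r,c) of given size has borders of all 0s.
--
--     Args:
--         below: Precomputed consecutive 0s going down
--         right: Precomputed consecutive 0s going right
--         r, c: Top-left corner
--         size: Size of the square
--
--     Returns:
--         True if borders are all 0s
--     """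
--     # Check top row: need 'size' consecutive 0s going right from (r, c)
--     top_row = right[r][c] >= size
--
--     # Check left column: need 'size' consecutive 0s going down from (r, c)
--     left_col = below[r][c] >= size
--
--     # Check bottom row: need 'size' consecutive 0s going right from (r+size-1, c)
--     bottom_row = right[r + size - 1][c] >= size
--
--     # Check right column: need 'size' consecutive 0s going down from (r, c+size-1)
--     right_col = below[r][c + size - 1] >= size
--
--     return top_row and left_col and bottom_row and right_col
--
-- def find_largest_square_of_zeroes(matrix: List[List[int]]) -> Optional[Tuple[int, int, int]]:
--     """
--     Find the position and size of the largest square with borders of all 0s.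
--
--     Args:
--         matrix: Square matrix of 0s and 1s
--
--     Returns:
--         Tuple (row, col, size) of the largest valid square, or None
--     """
--     if not matrix or not matrix[0]:
--         return None
--
--     n = len(matrix)
--
--     below = [[0] * n for _ in range(n)]
--     right = [[0] * n for _ in range(n)]
--
--     for i in range(n - 1, -1, -1):
--         for j in range(n - 1, -1, -1):
--             if matrix[i][j] == 0:
--                 below[i][j] = 1 + (below[i + 1][j] if i + 1 < n else 0)
--                 right[i][j] = 1 + (right[i][j + 1] if j + 1 < n else 0)
--
--     max_size = 0
--     best_pos = None
--
--     for r in range(n):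
--         for c in range(n):
--             if matrix[r][c] != 0:
--                 continue
--
--             possible_size = min(n - r, n - c)
--
--             for size in range(possible_size, max_size, -1):
--                 if has_square_of_zeroes(below, right, r, c, size):
--                     max_size = size
--                     best_pos = (r, c, size)
--                     break
--
--     return best_pos
-- ===== SOURCE B (Python) =====
-- from typing import List, Tuple, Optional
--
-- def find_largest_square_of_zeroes(matrix: List[List[int]]) -> Optional[Tuple[int, int, int]]:
--     """Per-row/per-column prefix counts of nonzero cells make each border test O(1);
--     scan sizes from largest to smallest and return the first row-major hit."""
--     if not matrix or not matrix[0]: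
--         return None
--     n = len(matrix)
--
--     rowp = [[0] * (n + 1) for _ in range(n)]  # rowp[i][t] = nonzero cells in matrix[i][0:t]
--     colp = [[0] * (n + 1) for _ in range(n)]  # colp[j][t] = nonzero cells in matrix[0:t][j]
--     for i in range(n):
--         for j in range(n):
--             nz = 0 if matrix[i][j] == 0 else 1
--             rowp[i][j + 1] = rowp[i][j] + nz
--             colp[j][i + 1] = colp[j][i] + nz
--
--     def row_zero(i, c, size):
--         return rowp[i][c + size] == rowp[i][c]
--
--     def col_zero(j, r, size):
--         return colp[j][r + size] == colp[j][r]
--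
--     for size in range(n, 0, -1):
--         for r in range(n - size + 1):
--             for c in range(n - size + 1):
--                 if (row_zero(r, c, size) and row_zero(r + size - 1, c, size)
--                         and col_zero(c, r, size) and col_zero(c + size - 1, r, size)):
--                     return (r, c, size)
--     return None
-- ===== Notes on version B (the rewrite author's own statement) =====
-- stated objective: alternative
-- what changed: Replaced A's consecutive-zero DP tables plus row-major running-maximum scan by per-row/per-column prefix counts of nonzero cells (each border test is one prefix difference) and a size-descending search that returns at the first row-major hit.
import Mathlib
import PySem

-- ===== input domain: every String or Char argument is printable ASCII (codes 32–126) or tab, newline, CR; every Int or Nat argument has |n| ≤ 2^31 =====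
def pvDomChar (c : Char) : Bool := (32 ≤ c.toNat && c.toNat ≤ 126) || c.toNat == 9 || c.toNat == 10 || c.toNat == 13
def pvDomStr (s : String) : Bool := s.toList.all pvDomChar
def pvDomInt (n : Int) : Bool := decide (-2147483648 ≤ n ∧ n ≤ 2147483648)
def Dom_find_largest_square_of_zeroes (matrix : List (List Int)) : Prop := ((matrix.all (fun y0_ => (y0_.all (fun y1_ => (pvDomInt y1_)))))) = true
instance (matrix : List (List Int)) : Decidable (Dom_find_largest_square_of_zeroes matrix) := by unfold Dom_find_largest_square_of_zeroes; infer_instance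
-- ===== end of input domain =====

-- B replaces A's consecutive-zero DP tables and running maximum by per-row/per-column
-- prefix counts of nonzero cells and a size-descending, first-hit search (alternative, same cost).
-- Under Pre_ all matrix indices used by either program are in range, so list
-- accesses are ported with getD (exact on Pre_; the defaults are never reached there).

-- ===== PORT A =====
-- matrix[i][j]; under Pre_ every access is in range
def pvCellA (m : List (List Int)) (i j : Nat) : Int := (m.getD i []).getD j 1
-- table read t[i][j] / write t[i][j] = v (tables are n×n lists of lists, as in A)
def pvGet2 (t : List (List Int)) (i j : Nat) : Int := (t.getD i []).getD j 0
def pvSet2 (t : List (List Int)) (i j : Nat) (v : Int) : List (List Int) :=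
  t.set i ((t.getD i []).set j v)

def has_square_of_zeroes (below right_ : List (List Int)) (r c size : Nat) : Bool :=
  decide ((size : Int) ≤ pvGet2 right_ r c) &&
  decide ((size : Int) ≤ pvGet2 below r c) &&
  decide ((size : Int) ≤ pvGet2 right_ (r + size - 1) c) &&
  decide ((size : Int) ≤ pvGet2 below r (c + size - 1))

-- [[0]*n for _ in range(n)]
def pvZeros (n : Nat) : List (List Int) := List.replicate n (List.replicate n 0)

-- body of the i/j table-filling loop (i, j descend; range(n-1,-1,-1) ↦ (List.range n).reverse, indices are nonnegative)
def pvTblStep (m : List (List Int)) (n : Nat) (st : List (List Int) × List (List Int)) (i j : Nat) :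
    List (List Int) × List (List Int) :=
  if pvCellA m i j == 0 then
    (pvSet2 st.1 i j (1 + (if i + 1 < n then pvGet2 st.1 (i+1) j else 0)),
     pvSet2 st.2 i j (1 + (if j + 1 < n then pvGet2 st.2 i (j+1) else 0)))
  else st

def pvTables (m : List (List Int)) (n : Nat) : List (List Int) × List (List Int) :=
  ((List.range n).reverse).foldl
    (fun st i => ((List.range n).reverse).foldl (fun st j => pvTblStep m n st i j) st)
    (pvZeros n, pvZeros n)

-- body of the r/c search loop; the inner `for size in range(possible, max_size, -1): … break`
-- is the first size (descending) with has_square_of_zeroes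
def pvCellStep (m below right_ : List (List Int)) (n : Nat)
    (st : Nat × Option (Int × Int × Int)) (r c : Nat) : Nat × Option (Int × Int × Int) :=
  if pvCellA m r c != 0 then st
  else
    match ((List.range' (st.1 + 1) (min (n - r) (n - c) - st.1)).reverse).find?
            (fun s => has_square_of_zeroes below right_ r c s) with
    | some s => (s, some ((r : Int), (c : Int), (s : Int)))
    | none => st

def find_largest_square_of_zeroes (matrix : List (List Int)) : Option (Int × Int × Int) :=
  match matrix with
  | [] => none
  | r0 :: _ =>
    if r0.isEmpty then none
    else
      let n := matrix.length
      let tbl := pvTables matrix n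
      ((List.range n).foldl
        (fun st r => (List.range n).foldl (fun st c => pvCellStep matrix tbl.1 tbl.2 n st r c) st)
        (0, none)).2

-- ===== PORT B =====
def pvCellB (m : List (List Int)) (i j : Nat) : Int := (m.getD i []).getD j 1
-- prefix-table read t[i][j] / write t[i][j] = v
def pvBGet (t : List (List Int)) (i j : Nat) : Int := (t.getD i []).getD j 0
def pvBSet (t : List (List Int)) (i j : Nat) (v : Int) : List (List Int) :=
  t.set i ((t.getD i []).set j v)
-- [[0]*cols for _ in range(rows)]
def pvZeroTbl (rows cols : Nat) : List (List Int) := List.replicate rows (List.replicate cols 0)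

-- body of the prefix-filling loop: rowp[i][j+1] = rowp[i][j] + nz; colp[j][i+1] = colp[j][i] + nz
def pvPrefStep (m : List (List Int)) (st : List (List Int) × List (List Int)) (i j : Nat) :
    List (List Int) × List (List Int) :=
  let nz : Int := if pvCellB m i j == 0 then 0 else 1
  (pvBSet st.1 i (j + 1) (pvBGet st.1 i j + nz),
   pvBSet st.2 j (i + 1) (pvBGet st.2 j i + nz))

def pvPrefs (m : List (List Int)) (n : Nat) : List (List Int) × List (List Int) :=
  (List.range n).foldl (fun st i => (List.range n).foldl (fun st j => pvPrefStep m st i j) st)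
    (pvZeroTbl n (n + 1), pvZeroTbl n (n + 1))

-- the four O(1) border tests: a border is all zero iff its prefix-count difference is 0
def pvChk (rowp colp : List (List Int)) (r c s : Nat) : Bool :=
  (pvBGet rowp r (c + s) == pvBGet rowp r c) &&
  (pvBGet rowp (r + s - 1) (c + s) == pvBGet rowp (r + s - 1) c) &&
  (pvBGet colp c (r + s) == pvBGet colp c r) &&
  (pvBGet colp (c + s - 1) (r + s) == pvBGet colp (c + s - 1) r)

-- range(n,0,-1) ↦ (List.range' 1 n).reverse; the three early-returning loops are nested findSome?
def find_largest_square_of_zeroes_alt (matrix : List (List Int)) : Option (Int × Int × Int) :=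
  match matrix with
  | [] => none
  | r0 :: _ =>
    if r0.isEmpty then none
    else
      let n := matrix.length
      let p := pvPrefs matrix n
      ((List.range' 1 n).reverse).findSome? (fun size =>
        (List.range (n - size + 1)).findSome? (fun r =>
          (List.range (n - size + 1)).findSome? (fun c =>
            if pvChk p.1 p.2 r c size then some ((r : Int), (c : Int), (size : Int)) else none)))

-- ===== PRECONDITION & SPEC =====
-- Pre_ excludes exactly the matrices on which A raises IndexError: a nonempty first
-- row together with some row shorter than len(matrix).
def Pre_find_largest_square_of_zeroes (matrix : List (List Int)) : Prop :=
  matrix = [] ∨ matrix.headD [] = [] ∨ ∀ row ∈ matrix, matrix.length ≤ row.length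
instance (matrix : List (List Int)) : Decidable (Pre_find_largest_square_of_zeroes matrix) := by
  unfold Pre_find_largest_square_of_zeroes; infer_instance

def pvWitness_find_largest_square_of_zeroes : List (List Int) := [[0, 1], [1, 0]]

def Spec_find_largest_square_of_zeroes (matrix : List (List Int)) (out : Option (Int × Int × Int)) : Prop := out = find_largest_square_of_zeroes_alt matrix
instance (matrix : List (List Int)) (out : Option (Int × Int × Int)) : Decidable (Spec_find_largest_square_of_zeroes matrix out) := by unfold Spec_find_largest_square_of_zeroes; infer_instance

-- ===== CLAIM (what is proved, stated in full; the proofs are below) =====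
def Claim_equal_find_largest_square_of_zeroes : Prop := ∀ (matrix : List (List Int)), Dom_find_largest_square_of_zeroes matrix → Pre_find_largest_square_of_zeroes matrix → Spec_find_largest_square_of_zeroes matrix (find_largest_square_of_zeroes matrix)

-- ===== LEMMAS AND PROOFS =====

-- all-zero row/column segments, B's border check as one predicate, and the OK predicate
def pvRowZero (m : List (List Int)) (i c size : Nat) : Bool :=
  (List.range size).all (fun k => pvCellB m i (c + k) == 0)
def pvColZero (m : List (List Int)) (j r size : Nat) : Bool :=
  (List.range size).all (fun k => pvCellB m (r + k) j == 0)

-- B's border check as one Bool, and the OK predicate: a size-s square at (r,c)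
-- lies in the n×n grid and has all-zero borders
def pvOkB (m : List (List Int)) (r c s : Nat) : Bool :=
  pvRowZero m r c s && pvRowZero m (r + s - 1) c s && pvColZero m c r s && pvColZero m (c + s - 1) r s

def pvOK (m : List (List Int)) (n r c s : Nat) : Prop :=
  1 ≤ s ∧ r + s ≤ n ∧ c + s ≤ n ∧ pvOkB m r c s = true

-- run lengths of consecutive zeros rightwards / downwards, restricted to indices < n
def pvRunR (m : List (List Int)) (n r c : Nat) : Nat :=
  if _h : c < n then (if pvCellB m r c = 0 then pvRunR m n r (c + 1) + 1 else 0) else 0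
termination_by n - c
decreasing_by omega

def pvRunB (m : List (List Int)) (n r c : Nat) : Nat :=
  if _h : r < n then (if pvCellB m r c = 0 then pvRunB m n (r + 1) c + 1 else 0) else 0
termination_by n - r
decreasing_by omega

theorem le_pvRunR (m : List (List Int)) (n r : Nat) :
    ∀ (s c : Nat), (s ≤ pvRunR m n r c ↔ ∀ k < s, c + k < n ∧ pvCellB m r (c + k) = 0) := by
  intro s
  induction s with
  | zero => intro c; simp
  | succ s ih =>
    intro c
    rw [pvRunR]
    by_cases hc : c < n
    · by_cases hz : pvCellB m r c = 0
      · simp only [hc, hz, if_true, dif_pos]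
        rw [Nat.succ_le_succ_iff, ih (c + 1)]
        constructor
        · intro h k hk
          cases k with
          | zero => exact ⟨by simpa using hc, by simpa using hz⟩
          | succ k =>
            have h2 := h k (by omega)
            have e : c + 1 + k = c + (k + 1) := by omega
            rw [e] at h2
            exact h2
        · intro h k hk
          have h2 := h (k + 1) (by omega)
          have e : c + 1 + k = c + (k + 1) := by omega
          rw [e]
          exact h2
      · simp only [hc, hz, if_false, dif_pos]
        constructor
        · intro h; omega
        · intro h
          have h2 := h 0 (by omega)
          simp at h2
          exact absurd h2.2 hz
    · simp only [dif_neg hc]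
      constructor
      · intro h; omega
      · intro h
        have h2 := h 0 (by omega)
        omega

theorem le_pvRunB (m : List (List Int)) (n c : Nat) :
    ∀ (s r : Nat), (s ≤ pvRunB m n r c ↔ ∀ k < s, r + k < n ∧ pvCellB m (r + k) c = 0) := by
  intro s
  induction s with
  | zero => intro r; simp
  | succ s ih =>
    intro r
    rw [pvRunB]
    by_cases hc : r < n
    · by_cases hz : pvCellB m r c = 0
      · simp only [hc, hz, if_true, dif_pos]
        rw [Nat.succ_le_succ_iff, ih (r + 1)]
        constructor
        · intro h k hk
          cases k with
          | zero => exact ⟨by simpa using hc, by simpa using hz⟩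
          | succ k =>
            have h2 := h k (by omega)
            have e : r + 1 + k = r + (k + 1) := by omega
            rw [e] at h2
            exact h2
        · intro h k hk
          have h2 := h (k + 1) (by omega)
          have e : r + 1 + k = r + (k + 1) := by omega
          rw [e]
          exact h2
      · simp only [hc, hz, if_false, dif_pos]
        constructor
        · intro h; omega
        · intro h
          have h2 := h 0 (by omega)
          simp at h2
          exact absurd h2.2 hz
    · simp only [dif_neg hc]
      constructor
      · intro h; omega
      · intro h
        have h2 := h 0 (by omega)
        omega

theorem pvRunR_ge_iff (m : List (List Int)) (n r c s : Nat) (hs : 1 ≤ s) :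
    s ≤ pvRunR m n r c ↔ (c + s ≤ n ∧ pvRowZero m r c s = true) := by
  rw [le_pvRunR]
  simp only [pvRowZero, List.all_eq_true, List.mem_range, beq_iff_eq]
  constructor
  · intro h
    refine ⟨?_, fun k hk => (h k hk).2⟩
    have h2 := (h (s - 1) (by omega)).1
    omega
  · rintro ⟨hb, h⟩ k hk
    exact ⟨by omega, h k hk⟩

theorem pvRunB_ge_iff (m : List (List Int)) (n r c s : Nat) (hs : 1 ≤ s) :
    s ≤ pvRunB m n r c ↔ (r + s ≤ n ∧ pvColZero m c r s = true) := by
  rw [le_pvRunB]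
  simp only [pvColZero, List.all_eq_true, List.mem_range, beq_iff_eq]
  constructor
  · intro h
    refine ⟨?_, fun k hk => (h k hk).2⟩
    have h2 := (h (s - 1) (by omega)).1
    omega
  · rintro ⟨hb, h⟩ k hk
    exact ⟨by omega, h k hk⟩

-- getD/set bookkeeping for the n×n tables
theorem pvGetD_set {α : Type} (t : List α) (i : Nat) (v : α) (i' : Nat) (d : α) :
    (t.set i v).getD i' d = if i = i' ∧ i < t.length then v else t.getD i' d := by
  simp only [List.getD_eq_getElem?_getD, List.getElem?_set]
  split_ifs with h1 <;> simp_all <;> omega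

theorem pvGet2_set2 (t : List (List Int)) (i j : Nat) (v : Int) (i' j' : Nat)
    (hi : i < t.length) (hj : j < (t.getD i []).length) :
    pvGet2 (pvSet2 t i j v) i' j' = if i = i' ∧ j = j' then v else pvGet2 t i' j' := by
  unfold pvGet2 pvSet2
  rw [pvGetD_set]
  by_cases h : i = i'
  · subst h
    simp only [hi, and_true, true_and, if_true]
    rw [pvGetD_set]
    by_cases hjj : j = j'
    · subst hjj
      rw [if_pos ⟨rfl, hj⟩, if_pos rfl]
    · simp [hjj]
  · simp [h]

def pvTShape (t : List (List Int)) (n : Nat) : Prop :=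
  t.length = n ∧ ∀ i, i < n → (t.getD i []).length = n

theorem pvTShape_set2 (t : List (List Int)) (n i j : Nat) (v : Int)
    (h : pvTShape t n) (hi : i < n) : pvTShape (pvSet2 t i j v) n := by
  obtain ⟨hl, hr⟩ := h
  refine ⟨by simp [pvSet2, hl], ?_⟩
  intro i' hi'
  unfold pvSet2
  rw [pvGetD_set]
  by_cases hii : i = i'
  · subst hii
    rw [if_pos ⟨rfl, by omega⟩, List.length_set]
    exact hr i hi
  · rw [if_neg (by tauto)]
    exact hr i' hi' 

theorem pvTShape_zeros (n : Nat) : pvTShape (pvZeros n) n := by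
  refine ⟨by simp [pvZeros], ?_⟩
  intro i hi
  simp [pvZeros, List.getD_eq_getElem?_getD, List.getElem?_replicate, hi]

theorem pvGet2_zeros (n i j : Nat) : pvGet2 (pvZeros n) i j = 0 := by
  unfold pvGet2 pvZeros
  simp only [List.getD_eq_getElem?_getD, List.getElem?_replicate]
  by_cases hi : i < n <;> by_cases hj : j < n <;> simp [hi, hj]

-- invariants of the table-filling double loop
def pvCorr (m : List (List Int)) (n : Nat) (t : List (List Int) × List (List Int)) (i j : Nat) : Prop :=
  pvGet2 t.1 i j = (pvRunB m n i j : Int) ∧ pvGet2 t.2 i j = (pvRunR m n i j : Int)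

def pvZero2 (t : List (List Int) × List (List Int)) (i j : Nat) : Prop :=
  pvGet2 t.1 i j = 0 ∧ pvGet2 t.2 i j = 0

def pvRowsC (m : List (List Int)) (n k : Nat) (t : List (List Int) × List (List Int)) : Prop :=
  pvTShape t.1 n ∧ pvTShape t.2 n ∧
  ∀ i j, i < n → j < n → ((k ≤ i → pvCorr m n t i j) ∧ (i < k → pvZero2 t i j))

def pvRowC (m : List (List Int)) (n i J : Nat) (t : List (List Int) × List (List Int)) : Prop :=
  pvTShape t.1 n ∧ pvTShape t.2 n ∧
  ∀ i' j, i' < n → j < n →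
    ((i < i' → pvCorr m n t i' j) ∧ (i' < i → pvZero2 t i' j) ∧
     (i' = i → ((J ≤ j → pvCorr m n t i' j) ∧ (j < J → pvZero2 t i' j))))

theorem pvTblStep_inv (m : List (List Int)) (n i J : Nat) (hi : i < n) (hJ : J < n)
    (t : List (List Int) × List (List Int)) (h : pvRowC m n i (J + 1) t) :
    pvRowC m n i J (pvTblStep m n t i J) := by
  unfold pvRowC pvCorr pvZero2 at h ⊢
  obtain ⟨hs1, hs2, hv⟩ := h
  have hlen1 : i < t.1.length := by rw [hs1.1]; omega
  have hlen2 : i < t.2.length := by rw [hs2.1]; omega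
  have hrow1 : J < (t.1.getD i []).length := by rw [hs1.2 i hi]; omega
  have hrow2 : J < (t.2.getD i []).length := by rw [hs2.2 i hi]; omega
  by_cases hz : pvCellA m i J = 0
  · have hzB : pvCellB m i J = 0 := hz
    rw [pvTblStep, if_pos (by simp [hz])]
    set vB := 1 + (if i + 1 < n then pvGet2 t.1 (i + 1) J else 0) with hvB
    set vR := 1 + (if J + 1 < n then pvGet2 t.2 i (J + 1) else 0) with hvR
    have hB : vB = (pvRunB m n i J : Int) := by
      rw [hvB]
      conv_rhs => rw [pvRunB]
      rw [dif_pos hi, if_pos hzB]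
      by_cases h1 : i + 1 < n
      · rw [if_pos h1, ((hv (i + 1) J h1 hJ).1 (by omega)).1]
        push_cast
        ring
      · rw [if_neg h1]
        conv_rhs => rw [pvRunB]
        rw [dif_neg (by omega)]
        norm_num
    have hR : vR = (pvRunR m n i J : Int) := by
      rw [hvR]
      conv_rhs => rw [pvRunR]
      rw [dif_pos hJ, if_pos hzB]
      by_cases h1 : J + 1 < n
      · rw [if_pos h1, (((hv i (J + 1) hi h1).2.2 rfl).1 (by omega)).2]
        push_cast
        ring
      · rw [if_neg h1]
        conv_rhs => rw [pvRunR]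
        rw [dif_neg (by omega)]
        norm_num
    refine ⟨pvTShape_set2 t.1 n i J vB hs1 hi, pvTShape_set2 t.2 n i J vR hs2 hi, ?_⟩
    intro i' j hi' hj
    have g1 : pvGet2 (pvSet2 t.1 i J vB) i' j = if i = i' ∧ J = j then vB else pvGet2 t.1 i' j :=
      pvGet2_set2 t.1 i J vB i' j hlen1 hrow1
    have g2 : pvGet2 (pvSet2 t.2 i J vR) i' j = if i = i' ∧ J = j then vR else pvGet2 t.2 i' j :=
      pvGet2_set2 t.2 i J vR i' j hlen2 hrow2
    obtain ⟨ha, hb, hcc⟩ := hv i' j hi' hj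
    refine ⟨?_, ?_, ?_⟩
    · intro hlt
      have hne : ¬(i = i' ∧ J = j) := by omega
      exact ⟨by rw [g1, if_neg hne]; exact (ha hlt).1, by rw [g2, if_neg hne]; exact (ha hlt).2⟩
    · intro hlt
      have hne : ¬(i = i' ∧ J = j) := by omega
      exact ⟨by rw [g1, if_neg hne]; exact (hb hlt).1, by rw [g2, if_neg hne]; exact (hb hlt).2⟩
    · intro he
      subst he
      constructor
      · intro hJj
        by_cases hjJ : j = J
        · subst hjJ
          exact ⟨by rw [g1, if_pos ⟨rfl, rfl⟩]; exact hB, by rw [g2, if_pos ⟨rfl, rfl⟩]; exact hR⟩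
        · have hne : ¬(i' = i' ∧ J = j) := by omega
          exact ⟨by rw [g1, if_neg hne]; exact ((hcc rfl).1 (by omega)).1,
                 by rw [g2, if_neg hne]; exact ((hcc rfl).1 (by omega)).2⟩
      · intro hlt
        have hne : ¬(i' = i' ∧ J = j) := by omega
        exact ⟨by rw [g1, if_neg hne]; exact ((hcc rfl).2 (by omega)).1,
               by rw [g2, if_neg hne]; exact ((hcc rfl).2 (by omega)).2⟩
  · have hzB : ¬ pvCellB m i J = 0 := hz
    rw [pvTblStep, if_neg (by simp [hz])]
    refine ⟨hs1, hs2, ?_⟩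
    intro i' j hi' hj
    obtain ⟨ha, hb, hcc⟩ := hv i' j hi' hj
    refine ⟨ha, hb, ?_⟩
    intro he
    subst he
    refine ⟨?_, fun hlt => (hcc rfl).2 (by omega)⟩
    intro hJj
    by_cases hjJ : j = J
    · subst hjJ
      have hzero := (hcc rfl).2 (by omega)
      have hrB : pvRunB m n i' j = 0 := by rw [pvRunB, dif_pos hi, if_neg hzB]
      have hrR : pvRunR m n i' j = 0 := by rw [pvRunR, dif_pos hJ, if_neg hzB]
      exact ⟨by rw [hzero.1, hrB]; rfl, by rw [hzero.2, hrR]; rfl⟩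
    · exact (hcc rfl).1 (by omega)

theorem pvTblRow_loop (m : List (List Int)) (n i : Nat) (hi : i < n) :
    ∀ (J : Nat), J ≤ n → ∀ t, pvRowC m n i J t →
      pvRowC m n i 0 (((List.range J).reverse).foldl (fun st j => pvTblStep m n st i j) t) := by
  intro J
  induction J with
  | zero => intro _ t h; simpa using h
  | succ J ih =>
    intro hJ t h
    rw [List.range_succ, List.reverse_append, List.reverse_cons, List.reverse_nil, List.nil_append,
        List.cons_append]
    simp only [List.nil_append, List.foldl_cons]
    exact ih (by omega) _ (pvTblStep_inv m n i J hi (by omega) t h)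

theorem pvRowC_of_rowsC (m : List (List Int)) (n i : Nat)
    (t : List (List Int) × List (List Int)) (h : pvRowsC m n (i + 1) t) : pvRowC m n i n t := by
  unfold pvRowsC at h
  unfold pvRowC
  obtain ⟨hs1, hs2, hv⟩ := h
  refine ⟨hs1, hs2, ?_⟩
  intro i' j hi' hj
  obtain ⟨ha, hb⟩ := hv i' j hi' hj
  exact ⟨fun hlt => ha (by omega), fun hlt => hb (by omega),
         fun he => ⟨fun hle => absurd hj (by omega), fun _ => hb (by omega)⟩⟩

theorem pvRowsC_of_rowC (m : List (List Int)) (n i : Nat)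
    (t : List (List Int) × List (List Int)) (h : pvRowC m n i 0 t) : pvRowsC m n i t := by
  unfold pvRowC at h
  unfold pvRowsC
  obtain ⟨hs1, hs2, hv⟩ := h
  refine ⟨hs1, hs2, ?_⟩
  intro i' j hi' hj
  obtain ⟨ha, hb, hc⟩ := hv i' j hi' hj
  constructor
  · intro hle
    rcases Nat.lt_or_ge i i' with hlt | hge
    · exact ha hlt
    · exact (hc (by omega)).1 (by omega)
  · exact hb

theorem pvTbl_loop (m : List (List Int)) (n : Nat) :
    ∀ (k : Nat), k ≤ n → ∀ t, pvRowsC m n k t →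
      pvRowsC m n 0 (((List.range k).reverse).foldl
        (fun st i => ((List.range n).reverse).foldl (fun st j => pvTblStep m n st i j) st) t) := by
  intro k
  induction k with
  | zero => intro _ t h; simpa using h
  | succ k ih =>
    intro hk t h
    rw [List.range_succ, List.reverse_append, List.reverse_cons, List.reverse_nil, List.nil_append,
        List.cons_append]
    simp only [List.nil_append, List.foldl_cons]
    refine ih (by omega) _ ?_
    refine pvRowsC_of_rowC m n k _ ?_
    exact pvTblRow_loop m n k (by omega) n (le_refl n) t (pvRowC_of_rowsC m n k t h)

theorem pvTables_rowsC (m : List (List Int)) (n : Nat) : pvRowsC m n 0 (pvTables m n) := by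
  unfold pvTables
  refine pvTbl_loop m n n (le_refl n) _ ?_
  unfold pvRowsC
  refine ⟨pvTShape_zeros n, pvTShape_zeros n, ?_⟩
  intro i j hi hj
  exact ⟨fun hle => absurd hi (by omega), fun _ => ⟨pvGet2_zeros n i j, pvGet2_zeros n i j⟩⟩

-- A's border test via the tables agrees with pvOK
theorem has_square_iff (m : List (List Int)) (n r c s : Nat) (hr : r < n) (hc : c < n) (hs : 1 ≤ s) :
    (has_square_of_zeroes (pvTables m n).1 (pvTables m n).2 r c s = true) ↔ pvOK m n r c s := by
  have htab := pvTables_rowsC m n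
  unfold pvRowsC pvCorr at htab
  obtain ⟨hs1, hs2, hv⟩ := htab
  simp only [has_square_of_zeroes, Bool.and_eq_true, decide_eq_true_iff]
  unfold pvOK pvOkB
  simp only [Bool.and_eq_true]
  rw [((hv r c hr hc).1 (Nat.zero_le r)).2, ((hv r c hr hc).1 (Nat.zero_le r)).1]
  by_cases hrs : r + s ≤ n
  · by_cases hcs : c + s ≤ n
    · rw [((hv (r + s - 1) c (by omega) hc).1 (Nat.zero_le _)).2,
          ((hv r (c + s - 1) hr (by omega)).1 (Nat.zero_le _)).1]
      rw [Nat.cast_le, Nat.cast_le, Nat.cast_le, Nat.cast_le]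
      rw [pvRunR_ge_iff m n r c s hs, pvRunB_ge_iff m n r c s hs,
          pvRunR_ge_iff m n (r + s - 1) c s hs, pvRunB_ge_iff m n r (c + s - 1) s hs]
      constructor
      · intro h
        exact ⟨hs, hrs, hcs, ⟨⟨h.1.1.1.2, h.1.2.2⟩, h.1.1.2.2⟩, h.2.2⟩
      · rintro ⟨_, _, _, ⟨⟨hz1, hz2⟩, hz3⟩, hz4⟩
        exact ⟨⟨⟨⟨hcs, hz1⟩, hrs, hz3⟩, hcs, hz2⟩, hrs, hz4⟩
    · constructor
      · intro h
        have hB := h.1.1.1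
        rw [Nat.cast_le, pvRunR_ge_iff m n r c s hs] at hB
        exact absurd hB.1 hcs
      · rintro ⟨_, _, hcs', _⟩
        exact absurd hcs' hcs
  · constructor
    · intro h
      have hB := h.1.1.2
      rw [Nat.cast_le, pvRunB_ge_iff m n r c s hs] at hB
      exact absurd hB.1 hrs
    · rintro ⟨_, hrs', _, _⟩
      exact absurd hrs' hrs

theorem pvOK_cell (m : List (List Int)) (n r c s : Nat) : pvOK m n r c s → pvCellB m r c = 0 := by
  rintro ⟨hs, _, _, hok⟩
  unfold pvOkB at hok
  simp only [Bool.and_eq_true] at hok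
  have h1 := hok.1.1.1
  unfold pvRowZero at h1
  simp only [List.all_eq_true, List.mem_range, beq_iff_eq] at h1
  have h2 := h1 0 (by omega)
  simpa using h2

-- ===== correctness of B's prefix tables =====

-- prefix counts of nonzero cells along a row / a column
def pvCntR (m : List (List Int)) (i : Nat) : Nat → Nat
  | 0 => 0
  | t + 1 => pvCntR m i t + (if pvCellB m i t = 0 then 0 else 1)

def pvCntC (m : List (List Int)) (j : Nat) : Nat → Nat
  | 0 => 0
  | t + 1 => pvCntC m j t + (if pvCellB m t j = 0 then 0 else 1)

def pvTShape2 (t : List (List Int)) (rows cols : Nat) : Prop :=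
  t.length = rows ∧ ∀ i, i < rows → (t.getD i []).length = cols

theorem pvBGet_set (t : List (List Int)) (i j : Nat) (v : Int) (i' j' : Nat)
    (hi : i < t.length) (hj : j < (t.getD i []).length) :
    pvBGet (pvBSet t i j v) i' j' = if i = i' ∧ j = j' then v else pvBGet t i' j' :=
  pvGet2_set2 t i j v i' j' hi hj

theorem pvTShape2_set (t : List (List Int)) (rows cols i j : Nat) (v : Int)
    (h : pvTShape2 t rows cols) (hi : i < rows) : pvTShape2 (pvBSet t i j v) rows cols := by
  obtain ⟨hl, hr⟩ := h
  refine ⟨by simp [pvBSet, hl], ?_⟩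
  intro i' hi'
  unfold pvBSet
  rw [pvGetD_set]
  by_cases hii : i = i'
  · subst hii
    rw [if_pos ⟨rfl, by omega⟩, List.length_set]
    exact hr i hi
  · rw [if_neg (by tauto)]
    exact hr i' hi'

theorem pvTShape2_zeroTbl (rows cols : Nat) : pvTShape2 (pvZeroTbl rows cols) rows cols := by
  refine ⟨by simp [pvZeroTbl], ?_⟩
  intro i hi
  simp [pvZeroTbl, List.getD_eq_getElem?_getD, List.getElem?_replicate, hi]

theorem pvBGet_zeroTbl (rows cols i j : Nat) : pvBGet (pvZeroTbl rows cols) i j = 0 := by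
  unfold pvBGet pvZeroTbl
  simp only [List.getD_eq_getElem?_getD, List.getElem?_replicate]
  by_cases hi : i < rows <;> by_cases hj : j < cols <;> simp [hi, hj]

-- invariant of the prefix-filling double loop at position (i, J)
def pvPInv (m : List (List Int)) (n i J : Nat) (t : List (List Int) × List (List Int)) : Prop :=
  pvTShape2 t.1 n (n + 1) ∧ pvTShape2 t.2 n (n + 1) ∧
  (∀ i' t', i' < n → t' ≤ n →
    ((i' < i → pvBGet t.1 i' t' = (pvCntR m i' t' : Int)) ∧
     (i' = i → ((t' ≤ J → pvBGet t.1 i' t' = (pvCntR m i' t' : Int)) ∧ (J < t' → pvBGet t.1 i' t' = 0))) ∧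
     (i < i' → pvBGet t.1 i' t' = 0))) ∧
  (∀ j t', j < n → t' ≤ n →
    ((j < J → ((t' ≤ i + 1 → pvBGet t.2 j t' = (pvCntC m j t' : Int)) ∧ (i + 1 < t' → pvBGet t.2 j t' = 0))) ∧
     (J ≤ j → ((t' ≤ i → pvBGet t.2 j t' = (pvCntC m j t' : Int)) ∧ (i < t' → pvBGet t.2 j t' = 0)))))

theorem pvPrefStep_inv (m : List (List Int)) (n i J : Nat) (hi : i < n) (hJ : J < n)
    (t : List (List Int) × List (List Int)) (h : pvPInv m n i J t) :
    pvPInv m n i (J + 1) (pvPrefStep m t i J) := by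
  obtain ⟨hs1, hs2, hrow, hcol⟩ := h
  unfold pvPrefStep
  set nz : Int := if pvCellB m i J == 0 then 0 else 1 with hnzdef
  have hnz : nz = ((if pvCellB m i J = 0 then 0 else 1 : Nat) : Int) := by
    by_cases hz : pvCellB m i J = 0 <;> simp [hnzdef, hz]
  have hlen1 : i < t.1.length := by rw [hs1.1]; omega
  have hlen2 : J < t.2.length := by rw [hs2.1]; omega
  have hrow1 : J + 1 < (t.1.getD i []).length := by rw [hs1.2 i hi]; omega
  have hrow2 : i + 1 < (t.2.getD J []).length := by rw [hs2.2 J hJ]; omega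
  have hval1 : pvBGet t.1 i J + nz = (pvCntR m i (J + 1) : Int) := by
    rw [((hrow i J hi (by omega)).2.1 rfl).1 (le_refl J), hnz]
    show ((pvCntR m i J : Int)) + _ = _
    have : pvCntR m i (J + 1) = pvCntR m i J + (if pvCellB m i J = 0 then 0 else 1) := rfl
    rw [this]
    push_cast
    ring
  have hval2 : pvBGet t.2 J i + nz = (pvCntC m J (i + 1) : Int) := by
    rw [((hcol J i hJ (by omega)).2 (le_refl J)).1 (le_refl i), hnz]
    have : pvCntC m J (i + 1) = pvCntC m J i + (if pvCellB m i J = 0 then 0 else 1) := rfl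
    rw [this]
    push_cast
    ring
  refine ⟨pvTShape2_set t.1 n (n + 1) i (J + 1) _ hs1 hi,
          pvTShape2_set t.2 n (n + 1) J (i + 1) _ hs2 hJ, ?_, ?_⟩
  · intro i' t' hi' ht'
    have g1 : pvBGet (pvBSet t.1 i (J + 1) (pvBGet t.1 i J + nz)) i' t' =
        if i = i' ∧ J + 1 = t' then pvBGet t.1 i J + nz else pvBGet t.1 i' t' :=
      pvBGet_set t.1 i (J + 1) _ i' t' hlen1 hrow1
    obtain ⟨ha, hb, hc⟩ := hrow i' t' hi' ht'
    refine ⟨?_, ?_, ?_⟩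
    · intro hlt
      rw [g1, if_neg (by omega)]
      exact ha hlt
    · intro he
      subst he
      constructor
      · intro ht
        by_cases heq : t' = J + 1
        · subst heq
          rw [g1, if_pos ⟨rfl, rfl⟩]
          exact hval1
        · rw [g1, if_neg (by omega)]
          exact (hb rfl).1 (by omega)
      · intro ht
        rw [g1, if_neg (by omega)]
        exact (hb rfl).2 (by omega)
    · intro hlt
      rw [g1, if_neg (by omega)]
      exact hc hlt
  · intro j t' hj ht'
    have g2 : pvBGet (pvBSet t.2 J (i + 1) (pvBGet t.2 J i + nz)) j t' =
        if J = j ∧ i + 1 = t' then pvBGet t.2 J i + nz else pvBGet t.2 j t' :=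
      pvBGet_set t.2 J (i + 1) _ j t' hlen2 hrow2
    obtain ⟨ha, hb⟩ := hcol j t' hj ht'
    constructor
    · intro hjJ
      by_cases hje : j = J
      · subst hje
        constructor
        · intro ht
          by_cases heq : t' = i + 1
          · subst heq
            rw [g2, if_pos ⟨rfl, rfl⟩]
            exact hval2
          · rw [g2, if_neg (by omega)]
            exact (hb (le_refl j)).1 (by omega)
        · intro ht
          rw [g2, if_neg (by omega)]
          exact (hb (le_refl j)).2 (by omega)
      · have hjlt : j < J := by omega
        exact ⟨fun ht => by rw [g2, if_neg (by omega)]; exact (ha hjlt).1 ht,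
               fun ht => by rw [g2, if_neg (by omega)]; exact (ha hjlt).2 ht⟩
    · intro hJj
      exact ⟨fun ht => by rw [g2, if_neg (by omega)]; exact (hb (by omega)).1 ht,
             fun ht => by rw [g2, if_neg (by omega)]; exact (hb (by omega)).2 ht⟩

theorem pvPref_row (m : List (List Int)) (n i : Nat) (hi : i < n) :
    ∀ (L J : Nat), J + L ≤ n → ∀ t, pvPInv m n i J t →
      pvPInv m n i (J + L) ((List.range' J L).foldl (fun st j => pvPrefStep m st i j) t) := by
  intro L
  induction L with
  | zero => intro J _ t h; simpa using h
  | succ L ih =>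
    intro J hle t h
    rw [List.range'_succ]
    simp only [List.foldl_cons]
    have hstep := pvPrefStep_inv m n i J hi (by omega) t h
    have hrest := ih (J + 1) (by omega) _ hstep
    have e : J + (L + 1) = J + 1 + L := by omega
    rw [e]
    exact hrest

theorem pvPInv_rowend (m : List (List Int)) (n i : Nat)
    (t : List (List Int) × List (List Int)) (h : pvPInv m n i n t) : pvPInv m n (i + 1) 0 t := by
  obtain ⟨hs1, hs2, hrow, hcol⟩ := h
  refine ⟨hs1, hs2, ?_, ?_⟩
  · intro i' t' hi' ht'
    obtain ⟨ha, hb, hc⟩ := hrow i' t' hi' ht'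
    refine ⟨?_, ?_, fun hlt => hc (by omega)⟩
    · intro hlt
      rcases Nat.lt_or_ge i' i with h' | h'
      · exact ha h'
      · have : i' = i := by omega
        exact (hb this).1 (by omega)
    · intro he
      refine ⟨?_, fun ht => hc (by omega)⟩
      intro ht
      have ht0 : t' = 0 := by omega
      subst ht0
      rw [hc (by omega)]
      simp [pvCntR]
  · intro j t' hj ht'
    obtain ⟨ha, _⟩ := hcol j t' hj ht'
    exact ⟨fun hjlt => absurd hjlt (by omega), fun _ => ha (by omega)⟩

theorem pvPref_rows (m : List (List Int)) (n : Nat) :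
    ∀ (L R : Nat), R + L ≤ n → ∀ t, pvPInv m n R 0 t →
      pvPInv m n (R + L) 0 ((List.range' R L).foldl
        (fun st i => (List.range n).foldl (fun st j => pvPrefStep m st i j) st) t) := by
  intro L
  induction L with
  | zero => intro R _ t h; simpa using h
  | succ L ih =>
    intro R hle t h
    rw [List.range'_succ]
    simp only [List.foldl_cons]
    have hrow := pvPref_row m n R (by omega) n 0 (by omega) t h
    simp only [Nat.zero_add] at hrow
    rw [← List.range_eq_range'] at hrow
    have hnext := pvPInv_rowend m n R _ hrow
    have hrest := ih (R + 1) (by omega) _ hnext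
    have e : R + (L + 1) = R + 1 + L := by omega
    rw [e]
    exact hrest

theorem pvPrefs_spec (m : List (List Int)) (n : Nat) :
    (∀ i t', i < n → t' ≤ n → pvBGet (pvPrefs m n).1 i t' = (pvCntR m i t' : Int)) ∧
    (∀ j t', j < n → t' ≤ n → pvBGet (pvPrefs m n).2 j t' = (pvCntC m j t' : Int)) := by
  have hinit : pvPInv m n 0 0 (pvZeroTbl n (n + 1), pvZeroTbl n (n + 1)) := by
    refine ⟨pvTShape2_zeroTbl n (n + 1), pvTShape2_zeroTbl n (n + 1), ?_, ?_⟩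
    · intro i' t' hi' ht'
      refine ⟨fun h => absurd h (by omega), ?_, fun _ => pvBGet_zeroTbl n (n + 1) i' t'⟩
      intro he
      refine ⟨?_, fun _ => pvBGet_zeroTbl n (n + 1) i' t'⟩
      intro ht
      have ht0 : t' = 0 := by omega
      subst ht0
      rw [pvBGet_zeroTbl]
      simp [pvCntR]
    · intro j t' hj ht'
      refine ⟨fun h => absurd h (by omega), ?_⟩
      intro _
      refine ⟨?_, fun _ => pvBGet_zeroTbl n (n + 1) j t'⟩
      intro ht
      have ht0 : t' = 0 := by omega
      subst ht0
      rw [pvBGet_zeroTbl]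
      simp [pvCntC]
  have hall := pvPref_rows m n n 0 (by omega) _ hinit
  simp only [Nat.zero_add] at hall
  rw [← List.range_eq_range'] at hall
  obtain ⟨_, _, hrow, hcol⟩ := hall
  unfold pvPrefs
  constructor
  · intro i t' hi ht'
    exact (hrow i t' hi ht').1 hi
  · intro j t' hj ht'
    exact ((hcol j t' hj ht').2 (by omega)).1 ht'

theorem pvCntR_mono (m : List (List Int)) (i : Nat) :
    ∀ (s c : Nat), pvCntR m i c ≤ pvCntR m i (c + s) := by
  intro s
  induction s with
  | zero => intro c; simp
  | succ s ih =>
    intro c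
    have e : c + (s + 1) = (c + s) + 1 := by omega
    rw [e]
    have : pvCntR m i ((c + s) + 1) = pvCntR m i (c + s) + (if pvCellB m i (c + s) = 0 then 0 else 1) := rfl
    rw [this]
    have := ih c
    omega

theorem pvCntC_mono (m : List (List Int)) (j : Nat) :
    ∀ (s c : Nat), pvCntC m j c ≤ pvCntC m j (c + s) := by
  intro s
  induction s with
  | zero => intro c; simp
  | succ s ih =>
    intro c
    have e : c + (s + 1) = (c + s) + 1 := by omega
    rw [e]
    have : pvCntC m j ((c + s) + 1) = pvCntC m j (c + s) + (if pvCellB m (c + s) j = 0 then 0 else 1) := rfl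
    rw [this]
    have := ih c
    omega

theorem pvCntR_diff_iff (m : List (List Int)) (i : Nat) :
    ∀ (s c : Nat), (pvCntR m i (c + s) = pvCntR m i c ↔ pvRowZero m i c s = true) := by
  intro s
  induction s with
  | zero => intro c; simp [pvRowZero]
  | succ s ih =>
    intro c
    have e : c + (s + 1) = (c + s) + 1 := by omega
    rw [e]
    have estep : pvCntR m i ((c + s) + 1) = pvCntR m i (c + s) + (if pvCellB m i (c + s) = 0 then 0 else 1) := rfl
    rw [estep]
    have hm := pvCntR_mono m i s c
    have hz : pvRowZero m i c (s + 1) = (pvRowZero m i c s && (pvCellB m i (c + s) == 0)) := by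
      unfold pvRowZero
      rw [List.range_succ, List.all_append]
      simp
    rw [hz]
    constructor
    · intro h
      have hiz : (if pvCellB m i (c + s) = 0 then 0 else 1) = 0 ∧ pvCntR m i (c + s) = pvCntR m i c := by
        omega
      have hcz : pvCellB m i (c + s) = 0 := by
        by_contra hne
        rw [if_neg hne] at hiz
        omega
      rw [Bool.and_eq_true, (ih c).mp hiz.2]
      simp [hcz]
    · intro h
      rw [Bool.and_eq_true] at h
      have hcz : pvCellB m i (c + s) = 0 := by simpa using h.2
      rw [if_pos hcz, ← (ih c).mpr h.1]
      omega

theorem pvCntC_diff_iff (m : List (List Int)) (j : Nat) :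
    ∀ (s r : Nat), (pvCntC m j (r + s) = pvCntC m j r ↔ pvColZero m j r s = true) := by
  intro s
  induction s with
  | zero => intro r; simp [pvColZero]
  | succ s ih =>
    intro r
    have e : r + (s + 1) = (r + s) + 1 := by omega
    rw [e]
    have estep : pvCntC m j ((r + s) + 1) = pvCntC m j (r + s) + (if pvCellB m (r + s) j = 0 then 0 else 1) := rfl
    rw [estep]
    have hm := pvCntC_mono m j s r
    have hz : pvColZero m j r (s + 1) = (pvColZero m j r s && (pvCellB m (r + s) j == 0)) := by
      unfold pvColZero
      rw [List.range_succ, List.all_append]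
      simp
    rw [hz]
    constructor
    · intro h
      have hiz : (if pvCellB m (r + s) j = 0 then 0 else 1) = 0 ∧ pvCntC m j (r + s) = pvCntC m j r := by
        omega
      have hcz : pvCellB m (r + s) j = 0 := by
        by_contra hne
        rw [if_neg hne] at hiz
        omega
      rw [Bool.and_eq_true, (ih r).mp hiz.2]
      simp [hcz]
    · intro h
      rw [Bool.and_eq_true] at h
      have hcz : pvCellB m (r + s) j = 0 := by simpa using h.2
      rw [if_pos hcz, ← (ih r).mpr h.1]
      omega

-- B's O(1) border test agrees with the direct border predicate, inside the grid
theorem pvChk_iff (m : List (List Int)) (n r c s : Nat) (hr : r < n) (hc : c < n) (hs : 1 ≤ s)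
    (hrs : r + s ≤ n) (hcs : c + s ≤ n) :
    (pvChk (pvPrefs m n).1 (pvPrefs m n).2 r c s = true) ↔ pvOkB m r c s = true := by
  obtain ⟨hrowT, hcolT⟩ := pvPrefs_spec m n
  unfold pvChk pvOkB
  simp only [Bool.and_eq_true, beq_iff_eq]
  rw [hrowT r (c + s) hr (by omega), hrowT r c hr (by omega),
      hrowT (r + s - 1) (c + s) (by omega) (by omega), hrowT (r + s - 1) c (by omega) (by omega),
      hcolT c (r + s) hc (by omega), hcolT c r hc (by omega),
      hcolT (c + s - 1) (r + s) (by omega) (by omega), hcolT (c + s - 1) r (by omega) (by omega)]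
  rw [Nat.cast_inj, Nat.cast_inj, Nat.cast_inj, Nat.cast_inj]
  rw [pvCntR_diff_iff m r s c, pvCntR_diff_iff m (r + s - 1) s c,
      pvCntC_diff_iff m c s r, pvCntC_diff_iff m (c + s - 1) s r]

-- find? on a strictly descending range returns the largest element satisfying p
theorem find?_revRange' (p : Nat → Bool) :
    ∀ (k a s : Nat), ((List.range' a k).reverse).find? p = some s →
      p s = true ∧ a ≤ s ∧ s < a + k ∧ ∀ t, s < t → t < a + k → p t = false := by
  intro k
  induction k with
  | zero => intro a s h; simp at h
  | succ k ih =>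
    intro a s h
    rw [List.range'_concat, List.reverse_append, List.reverse_cons, List.reverse_nil,
        List.nil_append, List.cons_append, List.nil_append] at h
    simp only [Nat.one_mul] at h
    by_cases hp : p (a + k) = true
    · rw [List.find?_cons_of_pos hp] at h
      obtain rfl : a + k = s := by injection h
      exact ⟨hp, by omega, by omega, fun t h1 h2 => by omega⟩
    · rw [List.find?_cons_of_neg hp] at h
      obtain ⟨h1, h2, h3, h4⟩ := ih a s h
      refine ⟨h1, h2, by omega, ?_⟩
      intro t ht1 ht2
      rcases Nat.lt_or_ge t (a + k) with hl | hg
      · exact h4 t ht1 hl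
      · have : t = a + k := by omega
        subst this
        simpa using hp

-- findSome? on an ascending range returns the first hit
theorem findSome?_range'_first {α : Type} (f : Nat → Option α) (v : α) :
    ∀ (k a x : Nat), a ≤ x → x < a + k → f x = some v → (∀ y, a ≤ y → y < x → f y = none) →
      (List.range' a k).findSome? f = some v := by
  intro k
  induction k with
  | zero => intro a x h1 h2 _ _; omega
  | succ k ih =>
    intro a x h1 h2 hx hbelow
    rw [List.range'_succ, List.findSome?_cons]
    by_cases hax : a = x
    · subst hax
      rw [hx]
    · rw [hbelow a (le_refl a) (by omega)]
      exact ih (a + 1) x (by omega) (by omega) hx (fun y hy1 hy2 => hbelow y (by omega) hy2)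

-- findSome? on [n, …, 1] returns the hit at the largest index
theorem findSome?_revRange1 {α : Type} (f : Nat → Option α) (v : α) :
    ∀ (n ms : Nat), 1 ≤ ms → ms ≤ n → f ms = some v → (∀ t, ms < t → t ≤ n → f t = none) →
      ((List.range' 1 n).reverse).findSome? f = some v := by
  intro n
  induction n with
  | zero => intro ms h1 h2 _ _; omega
  | succ n ih =>
    intro ms h1 h2 hv habove
    rw [List.range'_concat, List.reverse_append, List.reverse_cons, List.reverse_nil,
        List.nil_append, List.cons_append, List.nil_append]
    simp only [Nat.one_mul]
    rw [List.findSome?_cons]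
    by_cases hms : ms = 1 + n
    · subst hms
      rw [hv]
    · rw [habove (1 + n) (by omega) (by omega)]
      exact ih ms h1 (by omega) hv (fun t ht1 ht2 => habove t ht1 (by omega))

-- invariant of A's row-major search loop: processed cells are those before (R,C)
def pvProc (R C r c : Nat) : Prop := r < R ∨ (r = R ∧ c < C)

def pvSInv (m : List (List Int)) (n R C : Nat) (st : Nat × Option (Int × Int × Int)) : Prop :=
  (st.1 = 0 → st.2 = none) ∧
  (∀ r c s, r < n → c < n → pvProc R C r c → pvOK m n r c s → s ≤ st.1) ∧
  (0 < st.1 → ∃ r0 c0, r0 < n ∧ c0 < n ∧ pvProc R C r0 c0 ∧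
      st.2 = some ((r0 : Int), (c0 : Int), (st.1 : Int)) ∧ pvOK m n r0 c0 st.1 ∧
      ∀ r c, r < n → c < n → pvProc r0 c0 r c → ¬ pvOK m n r c st.1)

theorem pvCellStep_inv (m : List (List Int)) (n R C : Nat) (hR : R < n) (hC : C < n)
    (st : Nat × Option (Int × Int × Int)) (h : pvSInv m n R C st) :
    pvSInv m n R (C + 1) (pvCellStep m (pvTables m n).1 (pvTables m n).2 n st R C) := by
  unfold pvSInv at h ⊢
  obtain ⟨h1, h2, h3⟩ := h
  unfold pvCellStep
  by_cases hz : pvCellA m R C = 0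
  · rw [if_neg (by simp [hz])]
    have hmm : min (n - R) (n - C) = n - R ∨ min (n - R) (n - C) = n - C := by
      rcases Nat.le_total (n - R) (n - C) with hle | hle
      · exact Or.inl (Nat.min_eq_left hle)
      · exact Or.inr (Nat.min_eq_right hle)
    cases hfind : ((List.range' (st.1 + 1) (min (n - R) (n - C) - st.1)).reverse).find?
        (fun s => has_square_of_zeroes (pvTables m n).1 (pvTables m n).2 R C s) with
    | none =>
      have hnone := List.find?_eq_none.mp hfind
      have hub : ∀ s', pvOK m n R C s' → s' ≤ st.1 := by
        intro s' hok
        by_contra hgt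
        have hb1 : R + s' ≤ n := hok.2.1
        have hb2 : C + s' ≤ n := hok.2.2.1
        have hmem : s' ∈ (List.range' (st.1 + 1) (min (n - R) (n - C) - st.1)).reverse := by
          rw [List.mem_reverse, List.mem_range']
          exact ⟨s' - (st.1 + 1), by omega, by omega⟩
        have hfalse := hnone s' hmem
        exact hfalse ((has_square_iff m n R C s' hR hC hok.1).mpr hok)
      refine ⟨h1, ?_, ?_⟩
      · intro r c s hr hc hp hok
        by_cases hnew : r = R ∧ c = C
        · obtain ⟨rfl, rfl⟩ := hnew
          exact hub s hok
        · exact h2 r c s hr hc (by unfold pvProc at hp ⊢; omega) hok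
      · intro hpos
        obtain ⟨r0, c0, hr0, hc0, hproc, hst, hok, hmin⟩ := h3 hpos
        exact ⟨r0, c0, hr0, hc0, by unfold pvProc at hproc ⊢; omega, hst, hok, hmin⟩
    | some s =>
      obtain ⟨hps, hlo, hhi, habove⟩ := find?_revRange' _ _ _ _ hfind
      have hok_s : pvOK m n R C s :=
        (has_square_iff m n R C s hR hC (by omega)).mp hps
      have hub : ∀ s'', pvOK m n R C s'' → s'' ≤ s := by
        intro s'' hok
        by_contra hgt
        have hb1 : R + s'' ≤ n := hok.2.1
        have hb2 : C + s'' ≤ n := hok.2.2.1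
        have hfalse := habove s'' (by omega) (by omega)
        have ht := (has_square_iff m n R C s'' hR hC hok.1).mpr hok
        simp [ht] at hfalse
      refine ⟨?_, ?_, ?_⟩
      · intro h0
        have h0' : s = 0 := h0
        omega
      · intro r c s'' hr hc hp hok
        by_cases hnew : r = R ∧ c = C
        · obtain ⟨rfl, rfl⟩ := hnew
          exact hub s'' hok
        · have := h2 r c s'' hr hc (by unfold pvProc at hp ⊢; omega) hok
          show s'' ≤ s
          omega
      · intro _
        refine ⟨R, C, hR, hC, by unfold pvProc; omega, rfl, hok_s, ?_⟩
        intro r c hr hc hp hok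
        have := h2 r c s hr hc (by unfold pvProc at hp ⊢; omega) hok
        omega
  · rw [if_pos (by simpa [bne_iff_ne] using hz)]
    refine ⟨h1, ?_, ?_⟩
    · intro r c s hr hc hp hok
      by_cases hnew : r = R ∧ c = C
      · obtain ⟨rfl, rfl⟩ := hnew
        exact absurd (pvOK_cell m n r c s hok) hz
      · exact h2 r c s hr hc (by unfold pvProc at hp ⊢; omega) hok
    · intro hpos
      obtain ⟨r0, c0, hr0, hc0, hproc, hst, hok, hmin⟩ := h3 hpos
      exact ⟨r0, c0, hr0, hc0, by unfold pvProc at hproc ⊢; omega, hst, hok, hmin⟩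

theorem pvSearch_row (m : List (List Int)) (n R : Nat) (hR : R < n) :
    ∀ (L C : Nat), C + L ≤ n → ∀ st, pvSInv m n R C st →
      pvSInv m n R (C + L) ((List.range' C L).foldl
        (fun st c => pvCellStep m (pvTables m n).1 (pvTables m n).2 n st R c) st) := by
  intro L
  induction L with
  | zero => intro C _ st h; simpa using h
  | succ L ih =>
    intro C hle st h
    rw [List.range'_succ]
    simp only [List.foldl_cons]
    have hstep := pvCellStep_inv m n R C hR (by omega) st h
    have hrest := ih (C + 1) (by omega) _ hstep
    have e : C + (L + 1) = C + 1 + L := by omega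
    rw [e]
    exact hrest

theorem pvSInv_rowend (m : List (List Int)) (n R : Nat)
    (st : Nat × Option (Int × Int × Int)) (h : pvSInv m n R n st) : pvSInv m n (R + 1) 0 st := by
  unfold pvSInv at h ⊢
  obtain ⟨h1, h2, h3⟩ := h
  refine ⟨h1, ?_, ?_⟩
  · intro r c s hr hc hp hok
    exact h2 r c s hr hc (by unfold pvProc at hp ⊢; omega) hok
  · intro hpos
    obtain ⟨r0, c0, hr0, hc0, hproc, hst, hok, hmin⟩ := h3 hpos
    exact ⟨r0, c0, hr0, hc0, by unfold pvProc at hproc ⊢; omega, hst, hok, hmin⟩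

theorem pvSearch_rows (m : List (List Int)) (n : Nat) :
    ∀ (L R : Nat), R + L ≤ n → ∀ st, pvSInv m n R 0 st →
      pvSInv m n (R + L) 0 ((List.range' R L).foldl
        (fun st r => (List.range n).foldl
          (fun st c => pvCellStep m (pvTables m n).1 (pvTables m n).2 n st r c) st) st) := by
  intro L
  induction L with
  | zero => intro R _ st h; simpa using h
  | succ L ih =>
    intro R hle st h
    rw [List.range'_succ]
    simp only [List.foldl_cons]
    have hrow := pvSearch_row m n R (by omega) n 0 (by omega) st h
    simp only [Nat.zero_add] at hrow
    rw [← List.range_eq_range'] at hrow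
    have hnext := pvSInv_rowend m n R _ hrow
    have hrest := ih (R + 1) (by omega) _ hnext
    have e : R + (L + 1) = R + 1 + L := by omega
    rw [e]
    exact hrest

theorem pvSearch_final (m : List (List Int)) (n : Nat) :
    pvSInv m n n 0 ((List.range n).foldl
      (fun st r => (List.range n).foldl
        (fun st c => pvCellStep m (pvTables m n).1 (pvTables m n).2 n st r c) st) (0, none)) := by
  have hinit : pvSInv m n 0 0 (0, none) := by
    unfold pvSInv
    refine ⟨fun _ => rfl, ?_, ?_⟩
    · intro r c s hr hc hp hok
      unfold pvProc at hp
      omega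
    · intro hpos
      omega
  have hall := pvSearch_rows m n n 0 (by omega) (0, none) hinit
  simp only [Nat.zero_add] at hall
  rw [← List.range_eq_range'] at hall
  exact hall

-- core equality of the two searches
theorem pvMain_core (m : List (List Int)) (n : Nat) :
    ((List.range n).foldl
      (fun st r => (List.range n).foldl
        (fun st c => pvCellStep m (pvTables m n).1 (pvTables m n).2 n st r c) st)
      ((0 : Nat), (none : Option (Int × Int × Int)))).2 =
    ((List.range' 1 n).reverse).findSome? (fun size =>
      (List.range (n - size + 1)).findSome? (fun r =>
        (List.range (n - size + 1)).findSome? (fun c =>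
          if pvChk (pvPrefs m n).1 (pvPrefs m n).2 r c size
          then some ((r : Int), (c : Int), (size : Int)) else none))) := by
  have hinv := pvSearch_final m n
  unfold pvSInv at hinv
  set st := ((List.range n).foldl
      (fun st r => (List.range n).foldl
        (fun st c => pvCellStep m (pvTables m n).1 (pvTables m n).2 n st r c) st)
      ((0 : Nat), (none : Option (Int × Int × Int)))) with hstdef
  obtain ⟨h1, h2, h3⟩ := hinv
  have hproc_all : ∀ r c : Nat, r < n → c < n → pvProc n 0 r c := by
    intro r c hr _
    unfold pvProc
    omega
  rcases Nat.eq_zero_or_pos st.1 with hz | hpos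
  · rw [h1 hz]
    symm
    rw [List.findSome?_eq_none_iff]
    intro size hsize
    rw [List.mem_reverse, List.mem_range'] at hsize
    obtain ⟨i, hi, rfl⟩ := hsize
    rw [List.findSome?_eq_none_iff]
    intro r hr
    rw [List.mem_range] at hr
    rw [List.findSome?_eq_none_iff]
    intro c hc
    rw [List.mem_range] at hc
    rw [if_neg]
    intro hcond
    have hok4 := (pvChk_iff m n r c (1 + 1 * i) (by omega) (by omega) (by omega)
      (by omega) (by omega)).mp hcond
    have hok : pvOK m n r c (1 + 1 * i) := ⟨by omega, by omega, by omega, hok4⟩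
    have := h2 r c (1 + 1 * i) (by omega) (by omega) (hproc_all r c (by omega) (by omega)) hok
    omega
  · obtain ⟨r0, c0, hr0, hc0, _, hst2, hok, hmin⟩ := h3 hpos
    rw [hst2]
    symm
    have hb1 : r0 + st.1 ≤ n := hok.2.1
    have hb2 : c0 + st.1 ≤ n := hok.2.2.1
    apply findSome?_revRange1 _ _ n st.1 (by omega) (by omega)
    · -- the size st.1 yields the first row-major hit (r0, c0)
      rw [List.range_eq_range']
      apply findSome?_range'_first _ _ (n - st.1 + 1) 0 r0 (by omega) (by omega)
      · apply findSome?_range'_first _ _ (n - st.1 + 1) 0 c0 (by omega) (by omega)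
        · rw [if_pos ((pvChk_iff m n r0 c0 st.1 hr0 hc0 hok.1 hb1 hb2).mpr hok.2.2.2)]
        · intro c hc1 hc2
          rw [if_neg]
          intro hcond
          exact hmin r0 c hr0 (by omega) (by unfold pvProc; omega)
            ⟨hok.1, by omega, by omega,
             (pvChk_iff m n r0 c st.1 hr0 (by omega) hok.1 hb1 (by omega)).mp hcond⟩
      · intro r hr1 hr2
        rw [List.findSome?_eq_none_iff]
        intro c hcmem
        rw [List.mem_range'] at hcmem
        obtain ⟨j, hj, rfl⟩ := hcmem
        rw [if_neg]
        intro hcond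
        exact hmin r (0 + 1 * j) (by omega) (by omega) (by unfold pvProc; omega)
          ⟨hok.1, by omega, by omega,
           (pvChk_iff m n r (0 + 1 * j) st.1 (by omega) (by omega) hok.1 (by omega) (by omega)).mp hcond⟩
    · intro t ht1 ht2
      rw [List.findSome?_eq_none_iff]
      intro r hrmem
      rw [List.mem_range] at hrmem
      rw [List.findSome?_eq_none_iff]
      intro c hcmem
      rw [List.mem_range] at hcmem
      rw [if_neg]
      intro hcond
      have hok4 := (pvChk_iff m n r c t (by omega) (by omega) (by omega)
        (by omega) (by omega)).mp hcond
      have hok' : pvOK m n r c t := ⟨by omega, by omega, by omega, hok4⟩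
      have := h2 r c t (by omega) (by omega) (hproc_all r c (by omega) (by omega)) hok'
      omega

-- the two ports agree on every input (the Lean ports are total)
theorem pvMain_eq (matrix : List (List Int)) :
    find_largest_square_of_zeroes matrix = find_largest_square_of_zeroes_alt matrix := by
  cases matrix with
  | nil => rfl
  | cons r0 rest =>
    by_cases h0 : r0.isEmpty
    · simp [find_largest_square_of_zeroes, find_largest_square_of_zeroes_alt, h0]
    · simp only [find_largest_square_of_zeroes, find_largest_square_of_zeroes_alt]
      rw [if_neg h0, if_neg h0]
      exact pvMain_core (r0 :: rest) (r0 :: rest).length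

-- ===== VERDICT (by name: the statement is the Claim_ definition above) =====
theorem find_largest_square_of_zeroes_spec : Claim_equal_find_largest_square_of_zeroes := by
  intro matrix _ _
  unfold Spec_find_largest_square_of_zeroes
  exact pvMain_eq matrix
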